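-- pv_equiv track=rewrite | github.com/BitConcepts/kas-manifest-exporter | _kas_exporter.py | _filter_layer_list
-- ===== SOURCE A (Python) =====
-- from typing import Any, Dict, Union, Optional, Iterable
--
-- _LAYER_FILTER_SUBSTRS = [
--     "bitbake/lib/layerindexlib/tests/testdata",
--     "tests/"
-- ]
--
-- def _filter_layer_list(layers: Iterable[str]) -> list[str]:
--     seen, out = set(), []
--     for layer in layers:
--         if not layer:
--             continue
--         if any(s in layer for s in _LAYER_FILTER_SUBSTRS):
--             continue
--         if layer in seen:
--             continue
--         seen.add(layer)
--         out.append(layer)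
--     out.sort()
--     return out
-- ===== SOURCE B (Python) =====
-- _LAYER_FILTER_SUBSTRS = [
--     "bitbake/lib/layerindexlib/tests/testdata",
--     "tests/"
-- ]
--
-- def _filter_layer_list(layers):
--     # filter keeping duplicates, sort, then dedup by adjacency on the sorted list
--     kept = [layer for layer in layers
--             if layer and not any(s in layer for s in _LAYER_FILTER_SUBSTRS)]
--     kept.sort()
--     out = []
--     for layer in kept:
--         if not out or layer != out[-1]:
--             out.append(layer)
--     return out
-- ===== Notes on version B (the rewrite author's own statement) =====
-- stated objective: alternative
-- what changed: Drops the seen-set: B filters keeping duplicates, sorts the filtered list, then deduplicates in one adjacency pass over the sorted list instead of maintaining a hash set during filtering.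
import Mathlib
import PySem

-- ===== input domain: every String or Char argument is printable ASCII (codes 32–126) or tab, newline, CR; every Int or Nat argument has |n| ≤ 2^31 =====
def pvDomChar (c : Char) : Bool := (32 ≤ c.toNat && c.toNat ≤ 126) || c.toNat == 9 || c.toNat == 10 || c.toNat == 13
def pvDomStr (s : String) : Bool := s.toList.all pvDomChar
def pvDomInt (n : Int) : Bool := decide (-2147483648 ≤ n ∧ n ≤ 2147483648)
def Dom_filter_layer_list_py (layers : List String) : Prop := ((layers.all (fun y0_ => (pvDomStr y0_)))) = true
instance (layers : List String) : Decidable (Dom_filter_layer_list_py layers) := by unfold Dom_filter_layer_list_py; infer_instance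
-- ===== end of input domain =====

-- B drops A's seen-set: it filters keeping duplicates, sorts, then dedups in one adjacency pass (alternative decomposition, same cost).

def pvSubstrs : List String :=
  ["bitbake/lib/layerindexlib/tests/testdata", "tests/"]

-- ===== PORT A =====
def filter_layer_list_py (layers : List String) : List String :=
  let st := layers.foldl (fun (st : PySem.Set String × List String) layer =>
    if layer = "" then st
    else if pvSubstrs.any (fun s => PySem.Str.isIn s layer) then st
    else if PySem.Set.contains st.1 layer then st
    else (PySem.Set.add st.1 layer, st.2 ++ [layer])) (PySem.Set.empty, [])
  PySem.List.sorted st.2 (fun x => x) false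

-- ===== PORT B =====
def filter_layer_list_py_alt (layers : List String) : List String :=
  let kept := layers.filter (fun layer =>
    !(layer = "" : Bool) && !(pvSubstrs.any (fun s => PySem.Str.isIn s layer)))
  let sortedKept := PySem.List.sorted kept (fun x => x) false
  sortedKept.foldl (fun out layer =>
    if out.getLast? = some layer then out else out ++ [layer]) []

-- ===== PRECONDITION & SPEC =====
def Spec_filter_layer_list_py (layers : List String) (out : List String) : Prop := out = filter_layer_list_py_alt layers
instance (layers : List String) (out : List String) : Decidable (Spec_filter_layer_list_py layers out) := by unfold Spec_filter_layer_list_py; infer_instance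

-- ===== CLAIM (what is proved, stated in full; the proofs are below) =====
def Claim_equal_filter_layer_list_py : Prop := ∀ (layers : List String), Dom_filter_layer_list_py layers → Spec_filter_layer_list_py layers (filter_layer_list_py layers)

-- ===== LEMMAS AND PROOFS =====

def pvPred (layer : String) : Bool :=
  !(layer = "" : Bool) && !(pvSubstrs.any (fun s => PySem.Str.isIn s layer))

-- adjacency dedup, parameterised over the previously appended element
def pvAdjTail : Option String → List String → List String
  | _, [] => []
  | p, y :: ys => if p = some y then pvAdjTail (some y) ys else y :: pvAdjTail (some y) ys

theorem pvFoldB_eq (ys : List String) : ∀ (out : List String),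
    ys.foldl (fun out layer => if out.getLast? = some layer then out else out ++ [layer]) out
      = out ++ pvAdjTail out.getLast? ys := by
  induction ys with
  | nil => intro out; simp [pvAdjTail]
  | cons y ys ih =>
    intro out
    by_cases h : out.getLast? = some y
    · rw [List.foldl_cons]
      simp only [if_pos h]
      rw [ih out, h]
      simp [pvAdjTail]
    · rw [List.foldl_cons]
      simp only [if_neg h]
      rw [ih (out ++ [y])]
      have hl : (out ++ [y]).getLast? = some y := by simp
      rw [hl]
      have hstep : pvAdjTail out.getLast? (y :: ys) = y :: pvAdjTail (some y) ys := by
        simp [pvAdjTail, h]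
      rw [hstep, List.append_assoc]
      rfl

theorem pvAdjTail_some_spec (ys : List String) : ∀ (m : String),
    ys.Pairwise (· ≤ ·) → (∀ y ∈ ys, m ≤ y) →
    (∀ x, x ∈ pvAdjTail (some m) ys ↔ (x ∈ ys ∧ x ≠ m)) ∧
    (∀ x ∈ pvAdjTail (some m) ys, m < x) ∧
    (pvAdjTail (some m) ys).Pairwise (· < ·) := by
  induction ys with
  | nil => intro m _ _; simp [pvAdjTail]
  | cons y ys ih =>
    intro m hp hle
    have hyp : ys.Pairwise (· ≤ ·) := hp.of_cons
    have hyle : ∀ z ∈ ys, y ≤ z := fun z hz => (List.pairwise_cons.mp hp).1 z hz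
    have ihy := ih y hyp hyle
    by_cases h : y = m
    · subst h
      have hstep : pvAdjTail (some y) (y :: ys) = pvAdjTail (some y) ys := by
        simp [pvAdjTail]
      rw [hstep]
      refine ⟨fun x => ?_, ihy.2.1, ihy.2.2⟩
      rw [ihy.1 x]
      constructor
      · rintro ⟨hx, hne⟩; exact ⟨List.mem_cons_of_mem _ hx, hne⟩
      · rintro ⟨hx, hne⟩
        rcases List.mem_cons.mp hx with h1 | h1
        · exact absurd h1 hne
        · exact ⟨h1, hne⟩
    · have hmy : m < y := lt_of_le_of_ne (hle y (List.mem_cons_self)) (fun e => h e.symm)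
      have hne : ¬ m = y := fun e => h e.symm
      have hstep : pvAdjTail (some m) (y :: ys) = y :: pvAdjTail (some y) ys := by
        simp [pvAdjTail, hne]
      rw [hstep]
      refine ⟨fun x => ?_, ?_, ?_⟩
      · simp only [List.mem_cons]
        rw [ihy.1 x]
        constructor
        · rintro (rfl | ⟨hx, hxy⟩)
          · exact ⟨Or.inl rfl, fun e => h e⟩
          · refine ⟨Or.inr hx, ?_⟩
            intro e
            have hlt : m < x := lt_of_lt_of_le hmy (hyle x hx)
            rw [e] at hlt
            exact lt_irrefl m hlt
        · rintro ⟨(rfl | hx), hne2⟩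
          · exact Or.inl rfl
          · by_cases hxy : x = y
            · exact Or.inl hxy
            · exact Or.inr ⟨hx, hxy⟩
      · intro x hx
        rcases List.mem_cons.mp hx with rfl | hx
        · exact hmy
        · exact lt_trans hmy (ihy.2.1 x hx)
      · exact List.pairwise_cons.mpr ⟨fun z hz => ihy.2.1 z hz, ihy.2.2⟩

theorem pvAdjTail_none_spec (ys : List String) (hp : ys.Pairwise (· ≤ ·)) :
    (∀ x, x ∈ pvAdjTail none ys ↔ x ∈ ys) ∧ (pvAdjTail none ys).Pairwise (· < ·) := by
  cases ys with
  | nil => simp [pvAdjTail]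
  | cons y ys =>
    have hyp : ys.Pairwise (· ≤ ·) := hp.of_cons
    have hyle : ∀ z ∈ ys, y ≤ z := fun z hz => (List.pairwise_cons.mp hp).1 z hz
    have ihy := pvAdjTail_some_spec ys y hyp hyle
    have hstep : pvAdjTail none (y :: ys) = y :: pvAdjTail (some y) ys := by
      simp [pvAdjTail]
    rw [hstep]
    refine ⟨fun x => ?_, ?_⟩
    · simp only [List.mem_cons]
      rw [ihy.1 x]
      constructor
      · rintro (rfl | ⟨hx, _⟩)
        · exact Or.inl rfl
        · exact Or.inr hx
      · rintro (rfl | hx)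
        · exact Or.inl rfl
        · by_cases hxy : x = y
          · exact Or.inl hxy
          · exact Or.inr ⟨hx, hxy⟩
    · exact List.pairwise_cons.mpr ⟨fun z hz => ihy.2.1 z hz, ihy.2.2⟩

-- A's fold: the collected list has exactly the kept elements, without duplicates
theorem pvFoldA_spec (layers : List String) : ∀ (seen : PySem.Set String) (out : List String),
    (∀ x, x ∈ (seen : List String) ↔ x ∈ out) → out.Nodup →
    ((layers.foldl (fun (st : PySem.Set String × List String) layer =>
        if layer = "" then st
        else if pvSubstrs.any (fun s => PySem.Str.isIn s layer) then st
        else if PySem.Set.contains st.1 layer then st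
        else (PySem.Set.add st.1 layer, st.2 ++ [layer])) (seen, out)).2).Nodup ∧
    (∀ x, x ∈ (layers.foldl (fun (st : PySem.Set String × List String) layer =>
        if layer = "" then st
        else if pvSubstrs.any (fun s => PySem.Str.isIn s layer) then st
        else if PySem.Set.contains st.1 layer then st
        else (PySem.Set.add st.1 layer, st.2 ++ [layer])) (seen, out)).2
      ↔ x ∈ out ∨ (x ∈ layers ∧ pvPred x = true)) := by
  induction layers with
  | nil => intro seen out _ hnd; simpa using hnd
  | cons l ls ih =>
    intro seen out hsee hnd
    by_cases h1 : l = ""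
    · have hpf : pvPred l = false := by simp [pvPred, h1]
      have ihr := ih seen out hsee hnd
      simp only [List.foldl_cons, if_pos h1]
      refine ⟨ihr.1, fun x => ?_⟩
      rw [ihr.2 x]
      constructor
      · rintro (hx | ⟨hx, hpr⟩)
        · exact Or.inl hx
        · exact Or.inr ⟨List.mem_cons_of_mem _ hx, hpr⟩
      · rintro (hx | ⟨hx, hpr⟩)
        · exact Or.inl hx
        · rcases List.mem_cons.mp hx with rfl | hx
          · rw [hpf] at hpr; cases hpr
          · exact Or.inr ⟨hx, hpr⟩
    · by_cases h2 : pvSubstrs.any (fun s => PySem.Str.isIn s l) = true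
      · have hpf : pvPred l = false := by
          unfold pvPred
          rw [h2]
          simp
        have ihr := ih seen out hsee hnd
        simp only [List.foldl_cons, if_neg h1, if_pos h2]
        refine ⟨ihr.1, fun x => ?_⟩
        rw [ihr.2 x]
        constructor
        · rintro (hx | ⟨hx, hpr⟩)
          · exact Or.inl hx
          · exact Or.inr ⟨List.mem_cons_of_mem _ hx, hpr⟩
        · rintro (hx | ⟨hx, hpr⟩)
          · exact Or.inl hx
          · rcases List.mem_cons.mp hx with rfl | hx
            · rw [hpf] at hpr; cases hpr
            · exact Or.inr ⟨hx, hpr⟩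
      · have hpl : pvPred l = true := by
          unfold pvPred
          rw [Bool.and_eq_true, Bool.not_eq_true', Bool.not_eq_true']
          exact ⟨decide_eq_false h1, Bool.eq_false_iff.mpr h2⟩
        by_cases h3 : PySem.Set.contains seen l = true
        · have hlout : l ∈ out := (hsee l).mp (by simpa using h3)
          have ihr := ih seen out hsee hnd
          simp only [List.foldl_cons, if_neg h1, if_neg h2, if_pos h3]
          refine ⟨ihr.1, fun x => ?_⟩
          rw [ihr.2 x]
          constructor
          · rintro (hx | ⟨hx, hpr⟩)
            · exact Or.inl hx
            · exact Or.inr ⟨List.mem_cons_of_mem _ hx, hpr⟩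
          · rintro (hx | ⟨hx, hpr⟩)
            · exact Or.inl hx
            · rcases List.mem_cons.mp hx with rfl | hx
              · exact Or.inl hlout
              · exact Or.inr ⟨hx, hpr⟩
        · have hlseen : l ∉ (seen : List String) := by
            intro hmem
            exact h3 (by simpa [PySem.Set.contains] using hmem)
          have hlout : l ∉ out := fun hmem => hlseen ((hsee l).mpr hmem)
          have hadd : PySem.Set.add seen l = seen ++ [l] := by
            simp [PySem.Set.add, hlseen]
          have hsee' : ∀ x, x ∈ (PySem.Set.add seen l : List String) ↔ x ∈ out ++ [l] := by
            intro x
            rw [hadd]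
            simp only [List.mem_append]
            rw [hsee x]
          have hnd' : (out ++ [l]).Nodup := by
            rw [List.nodup_append]
            exact ⟨hnd, List.nodup_singleton l, by
              intro a ha b hb
              simp only [List.mem_singleton] at hb
              subst hb
              exact fun e => hlout (e ▸ ha)⟩
          have ihr := ih (PySem.Set.add seen l) (out ++ [l]) hsee' hnd'
          simp only [List.foldl_cons, if_neg h1, if_neg h2, if_neg h3]
          refine ⟨ihr.1, fun x => ?_⟩
          rw [ihr.2 x]
          simp only [List.mem_append, List.mem_cons, List.not_mem_nil, or_false]
          constructor
          · rintro ((hx | rfl) | ⟨hx, hpr⟩)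
            · exact Or.inl hx
            · exact Or.inr ⟨Or.inl rfl, hpl⟩
            · exact Or.inr ⟨Or.inr hx, hpr⟩
          · rintro (hx | ⟨(rfl | hx), hpr⟩)
            · exact Or.inl (Or.inl hx)
            · exact Or.inl (Or.inr rfl)
            · exact Or.inr ⟨hx, hpr⟩

-- ===== VERDICT (by name: the statement is the Claim_ definition above) =====
theorem filter_layer_list_py_spec : Claim_equal_filter_layer_list_py := by
  intro layers _
  unfold Spec_filter_layer_list_py filter_layer_list_py filter_layer_list_py_alt
  set kept := layers.filter (fun layer =>
    !(layer = "" : Bool) && !(pvSubstrs.any (fun s => PySem.Str.isIn s layer))) with hkept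
  set sk := PySem.List.sorted kept (fun x => x) false with hsk
  have hskp : sk.Pairwise (· ≤ ·) := by
    simpa using PySem.List.sorted_pairwise kept (fun x => x)
  have hadj := pvAdjTail_none_spec sk hskp
  rw [pvFoldB_eq sk []]
  simp only [List.getLast?_nil, List.nil_append]
  have hA := pvFoldA_spec layers PySem.Set.empty []
    (by intro x; simp [PySem.Set.empty]) List.nodup_nil
  have hBnd : (pvAdjTail none sk).Nodup :=
    hadj.2.imp (fun {a b} hab => ne_of_lt hab)
  apply PySem.List.sorted_eq_of_perm_of_pairwise_lt
  · rw [List.perm_ext_iff_of_nodup hBnd hA.1]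
    intro x
    rw [hadj.1 x, hA.2 x]
    simp only [hsk, PySem.List.mem_sorted, hkept, List.mem_filter, List.not_mem_nil,
      false_or, pvPred]
  · exact hadj.2
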